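-- pv_equiv track=rewrite | github.com/mikeqfu/network-rail-weather-rail-incident-prediction | Code/network.py | unique_lst
-- ===== SOURCE A (Python) =====
-- def unique_lst(lst_lst):
--     """
--     :param lst_lst: [list] A list of lists
--     :return: [list] A list of lists with each item-list being unique
--     """
--     output = []
--     temp = set()
--     for lst in lst_lst:
--         if any(item not in temp for item in lst):
--             # lst[0] not in temp and lst[1] not in temp:
--             output.append(lst)
--             for item in lst:
--                 temp.add(item)  # e.g. temp.add(lst[0]); temp.add(lst[1])
--     del temp
--     return output
-- ===== SOURCE B (Python) =====
-- def unique_lst(lst_lst):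
--     # Stage 1: map each item to the index of the first inner list containing it.
--     first = {}
--     for i, lst in enumerate(lst_lst):
--         for item in lst:
--             if item not in first:
--                 first[item] = i
--     # Stage 2: keep exactly the lists that are the first home of some item.
--     return [lst for i, lst in enumerate(lst_lst) if any(first[item] == i for item in lst)]
-- ===== Notes on version B (the rewrite author's own statement) =====
-- stated objective: alternative
-- what changed: Replaces A's single online pass with a growing seen-set by a two-stage algorithm: first build a dict mapping each item to the index of the first inner list containing it, then keep by comprehension exactly the lists that are the first home of some item; correct because A's seen-set after any prefix equals the union of all items in that prefix (dropped lists contribute nothing new).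
import Mathlib
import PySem

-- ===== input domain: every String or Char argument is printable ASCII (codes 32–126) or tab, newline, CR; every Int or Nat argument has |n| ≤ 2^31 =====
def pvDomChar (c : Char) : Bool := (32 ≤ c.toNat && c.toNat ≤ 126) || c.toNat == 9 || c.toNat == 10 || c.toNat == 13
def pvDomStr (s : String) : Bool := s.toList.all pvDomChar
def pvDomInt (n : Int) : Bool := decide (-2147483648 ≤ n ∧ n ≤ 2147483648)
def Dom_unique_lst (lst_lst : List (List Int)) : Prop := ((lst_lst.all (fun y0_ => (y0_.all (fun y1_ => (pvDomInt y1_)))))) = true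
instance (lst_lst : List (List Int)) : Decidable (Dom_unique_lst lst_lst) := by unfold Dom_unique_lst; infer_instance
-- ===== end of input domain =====

-- B replaces A's online seen-set filter by a two-stage algorithm (first-occurrence index dict,
-- then a comprehension keeping lists that are the first home of some item); return values proved equal.

-- ===== PORT A =====
-- A: one pass with a growing set `temp`; keep lst if any item is not yet in temp, then add its items.
def unique_lst (lst_lst : List (List Int)) : List (List Int) :=
  (lst_lst.foldl
    (fun (acc : List (List Int) × PySem.Set Int) lst =>
      if lst.any (fun item => !(PySem.Set.contains acc.2 item)) then
        (acc.1 ++ [lst], lst.foldl PySem.Set.add acc.2)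
      else acc)
    ([], PySem.Set.empty)).1

-- ===== PORT B =====
-- B stage 1: dict `first` mapping each item to the index of the first inner list containing it;
-- B stage 2: list comprehension keeping lst_lst[i] iff some of its items has first[item] == i.
def unique_lst_alt (lst_lst : List (List Int)) : List (List Int) :=
  let first : PySem.Dict Int Int :=
    (PySem.List.enumerate lst_lst).foldl
      (fun d p =>
        p.2.foldl (fun d item => if d.contains item then d else d.insert item p.1) d)
      PySem.Dict.empty
  ((PySem.List.enumerate lst_lst).filter
      (fun p => p.2.any (fun item => first.get? item == some p.1))).map (·.2)

-- ===== PRECONDITION & SPEC =====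
def Spec_unique_lst (lst_lst : List (List Int)) (out : List (List Int)) : Prop := out = unique_lst_alt lst_lst
instance (lst_lst : List (List Int)) (out : List (List Int)) : Decidable (Spec_unique_lst lst_lst out) := by unfold Spec_unique_lst; infer_instance

-- ===== CLAIM (what is proved, stated in full; the proofs are below) =====
def Claim_equal_unique_lst : Prop := ∀ (lst_lst : List (List Int)), Dom_unique_lst lst_lst → Spec_unique_lst lst_lst (unique_lst lst_lst)

-- ===== LEMMAS AND PROOFS =====

def pvRef : List (List Int) → List Int → List (List Int)
  | [], _ => []
  | l :: rest, seen =>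
    if l.any (fun x => !(seen.contains x)) then l :: pvRef rest (seen ++ l)
    else pvRef rest (seen ++ l)

theorem pvInner_get (l : List Int) : ∀ (d : PySem.Dict Int Int) (i x : Int),
    (l.foldl (fun d item => if d.contains item then d else d.insert item i) d).get? x
    = if d.contains x then d.get? x else if l.contains x then some i else d.get? x := by
  induction l with
  | nil => intro d i x; simp
  | cons y l ih =>
    intro d i x
    simp only [List.foldl]
    by_cases hy : d.contains y = true
    · rw [if_pos hy, ih]
      by_cases hx : d.contains x = true
      · simp [hx]
      · by_cases hxy : x = y
        · subst hxy; simp [hx] at hy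
        · simp [hx, hxy]
    · rw [if_neg hy, ih]
      by_cases hxy : x = y
      · subst hxy
        simp [hy, PySem.Dict.get?_insert_self]
      · rw [PySem.Dict.contains_insert]
        have hb : (x == y) = false := by simp [hxy]
        rw [hb, Bool.false_or, PySem.Dict.get?_insert_of_ne _ _ hxy]
        by_cases hx : d.contains x = true
        · simp [hx]
        · simp [hx, hxy]

theorem pvInner_contains (l : List Int) (d : PySem.Dict Int Int) (i x : Int) :
    (l.foldl (fun d item => if d.contains item then d else d.insert item i) d).contains x
    = (d.contains x || l.contains x) := by
  rw [PySem.Dict.contains_eq_isSome_get?, pvInner_get, PySem.Dict.contains_eq_isSome_get?]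
  by_cases hx : (d.get? x).isSome
  · simp [hx]
  · simp only [hx, Bool.false_eq_true, if_false, Bool.false_or]
    by_cases hm : x ∈ l
    · simp [hm]
    · simp only [hm, if_false, List.contains_iff_mem]
      simp [hm]
      simpa using hx

theorem pvDict_get (ls : List (List Int)) : ∀ (s : Int) (d : PySem.Dict Int Int) (x : Int),
    ((PySem.List.enumerate ls s).foldl
      (fun d p => p.2.foldl (fun d item => if d.contains item then d else d.insert item p.1) d) d).get? x
    = if d.contains x then d.get? x
      else (ls.findIdx? (fun l => l.contains x)).map (fun k => s + (k : Int)) := by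
  induction ls with
  | nil =>
    intro s d x
    simp only [PySem.List.enumerate_nil, List.foldl_nil, List.findIdx?_nil]
    by_cases hx : d.contains x = true
    · simp [hx]
    · simp only [hx, Bool.false_eq_true, if_false]
      cases hg : d.get? x with
      | none => simp
      | some v =>
        exfalso; apply hx
        rw [PySem.Dict.contains_eq_isSome_get?, hg]; rfl

  | cons l rest ih =>
    intro s d x
    rw [PySem.List.enumerate_cons]
    simp only [List.foldl]
    rw [ih, List.findIdx?_cons]
    by_cases hx : d.contains x = true
    · rw [pvInner_contains]
      simp only [hx, Bool.true_or, if_pos]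
      rw [pvInner_get]
      simp [hx]
    · rw [pvInner_contains]
      simp only [hx, Bool.false_or]
      by_cases hl : l.contains x = true
      · rw [pvInner_get]
        simp only [hx, Bool.false_eq_true, if_false, hl, if_pos]
        have hm : x ∈ l := by simpa [List.contains_iff_mem] using hl
        simp
      · simp only [hl, Bool.false_eq_true, if_false]
        cases h : rest.findIdx? (fun l => l.contains x) with
        | none => simp
        | some k =>
          simp only [Option.map_some]
          have : s + 1 + (k : Int) = s + ((k : Int) + 1) := by ring
          simp [this]

-- key: for item x in the list at index pre.length, the dict lookup equals pre.length iff x is new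
theorem pvCond (pre suf : List (List Int)) (l : List Int) (x : Int) (hx : x ∈ l) :
    (((pre ++ l :: suf).findIdx? (fun l' => l'.contains x)).map (fun k => (0:Int) + (k : Int)) == some (pre.length : Int))
    = !(pre.flatten.contains x) := by
  rw [List.findIdx?_append]
  cases h : pre.findIdx? (fun l' => l'.contains x) with
  | some j =>
    have hj : j < pre.length := by
      rw [List.findIdx?_eq_some_iff_findIdx_eq] at h; omega
    have hmem : x ∈ pre.flatten := by
      obtain ⟨h1, h2, -⟩ := List.findIdx?_eq_some_iff_getElem.mp h
      simp only [List.contains_iff_mem] at h2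
      exact List.mem_flatten.mpr ⟨pre[j], List.getElem_mem h1, h2⟩
    have hor : (some j).or (Option.map (fun i => i + pre.length) ((l :: suf).findIdx? (fun l' => l'.contains x))) = some j := rfl
    rw [hor]
    have hne : (0:Int) + (j:Int) ≠ (pre.length : Int) := by omega
    simp [hmem]
    omega
  | none =>
    have hnone : ∀ l' ∈ pre, l'.contains x = false := List.findIdx?_eq_none_iff.mp h
    have hmem : x ∉ pre.flatten := by
      intro hm
      obtain ⟨l', hl', hxl'⟩ := List.mem_flatten.mp hm
      have := hnone l' hl'
      simp [hxl'] at this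
    rw [List.findIdx?_cons]
    have hlx : l.contains x = true := by simpa [List.contains_iff_mem] using hx
    simp only [hlx, if_pos, Option.none_or, Option.map_some]
    simp [hmem]


theorem pvA_eq_ref (ls : List (List Int)) : ∀ (out : List (List Int)) (temp : PySem.Set Int) (seen : List Int),
    (∀ x, (x ∈ temp) ↔ x ∈ seen) →
    (ls.foldl
      (fun (acc : List (List Int) × PySem.Set Int) lst =>
        if lst.any (fun item => !(PySem.Set.contains acc.2 item)) then
          (acc.1 ++ [lst], lst.foldl PySem.Set.add acc.2)
        else acc)
      (out, temp)).1 = out ++ pvRef ls seen := by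
  induction ls with
  | nil => intro out temp seen h; simp [pvRef]
  | cons l rest ih =>
    intro out temp seen h
    have hc : (l.any fun item => !(PySem.Set.contains temp item)) = (l.any fun x => !(seen.contains x)) := by
      apply PySem.List.any_congr_mem
      intro x _
      have := h x
      simp at *
      simp [this]
    by_cases hb : (l.any fun x => !(seen.contains x)) = true
    · simp only [List.foldl, hc, hb, if_pos, pvRef]
      rw [ih (out ++ [l]) _ (seen ++ l) ?_]
      · simp
      · intro x
        have : l.foldl PySem.Set.add temp = l.foldl (fun s b => PySem.Set.add s b) temp := rfl
        rw [this, PySem.Set.mem_foldl_add]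
        simp [h x]
    · have hb' : (l.any fun x => !(seen.contains x)) = false := by simpa using hb
      simp only [List.foldl, hc, hb', Bool.false_eq_true, if_false, pvRef]
      rw [ih out temp (seen ++ l) ?_]
      intro x
      rw [h x]
      simp only [List.mem_append]
      constructor
      · exact Or.inl
      · rintro (hx | hx)
        · exact hx
        · simp only [List.any_eq_false] at hb'
          have := hb' x hx
          simpa [List.contains_iff_mem] using this

theorem pvB_eq_ref (lst_lst : List (List Int)) : ∀ (suf pre : List (List Int)), lst_lst = pre ++ suf →
    ((PySem.List.enumerate suf (pre.length : Int)).filter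
      (fun p => p.2.any (fun item =>
        ((PySem.List.enumerate lst_lst).foldl
          (fun d p => p.2.foldl (fun d item => if d.contains item then d else d.insert item p.1) d)
          PySem.Dict.empty).get? item == some p.1))).map (·.2)
    = pvRef suf pre.flatten := by
  intro suf
  induction suf with
  | nil => intro pre h; simp [PySem.List.enumerate_nil, pvRef]
  | cons l suf' ih =>
    intro pre heq
    rw [PySem.List.enumerate_cons, List.filter_cons]
    have hd : ∀ item : Int,
        ((PySem.List.enumerate lst_lst).foldl
          (fun d p => p.2.foldl (fun d item => if d.contains item then d else d.insert item p.1) d)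
          PySem.Dict.empty).get? item
        = (lst_lst.findIdx? (fun l' => l'.contains item)).map (fun k => (0:Int) + (k:Int)) := by
      intro item
      rw [pvDict_get]
      simp [PySem.Dict.contains_empty]
    have hcond : (l.any (fun item =>
        ((PySem.List.enumerate lst_lst).foldl
          (fun d p => p.2.foldl (fun d item => if d.contains item then d else d.insert item p.1) d)
          PySem.Dict.empty).get? item == some ((pre.length : Int))))
        = l.any (fun x => !(pre.flatten.contains x)) := by
      apply PySem.List.any_congr_mem
      intro x hxl
      rw [hd, heq, pvCond pre suf' l x hxl]
    have hih := ih (pre ++ [l]) (by simp [heq])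
    have hlen : (((pre ++ [l]).length : Nat) : Int) = (pre.length : Int) + 1 := by
      simp
    have hflat : (pre ++ [l]).flatten = pre.flatten ++ l := by simp
    rw [hlen, hflat] at hih
    simp only [pvRef, ← hcond]
    by_cases hb : (l.any (fun item =>
        ((PySem.List.enumerate lst_lst).foldl
          (fun d p => p.2.foldl (fun d item => if d.contains item then d else d.insert item p.1) d)
          PySem.Dict.empty).get? item == some ((pre.length : Int)))) = true
    · simp only [hb, if_pos, List.map_cons]
      rw [hih]
    · simp only [hb, Bool.false_eq_true, if_false]
      rw [hih]

-- ===== VERDICT (by name: the statement is the Claim_ definition above) =====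
theorem unique_lst_spec : Claim_equal_unique_lst := by
  intro lst_lst _
  unfold Spec_unique_lst unique_lst unique_lst_alt
  rw [pvA_eq_ref lst_lst [] PySem.Set.empty [] (by simp [PySem.Set.empty])]
  simpa using (pvB_eq_ref lst_lst lst_lst [] rfl).symm
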